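-- pv_equiv track=rewrite | github.com/jvffernandes1/AutoPython | QuineMcCluskeyV2.py | tabela_nivel1
-- ===== SOURCE A (Python) =====
-- import collections
--
-- def tabela_nivel1(entradas, mintermos, tabela_vdd):         # Essa função cria as tabelas iniciais para QuineMcCluskey
--     grupo0_binario = []
--     grupo0_mintermo = []
--     for y in range(0, entradas+1):
--         grupo0_binario.append([])
--         grupo0_mintermo.append([])
--
--     casa_tabela_vdd = 0
--
--     for x in tabela_vdd:
--         termos = collections.Counter(x)
--         contador_de_1s = 0
--         while contador_de_1s <= entradas:
--             if (termos['1'] == contador_de_1s) and (str(casa_tabela_vdd) in mintermos):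
--                 grupo0_binario[contador_de_1s].append(x)
--                 grupo0_mintermo[contador_de_1s].append("m"+str(casa_tabela_vdd))
--             contador_de_1s = contador_de_1s + 1
--         casa_tabela_vdd = casa_tabela_vdd + 1
--     return grupo0_binario, grupo0_mintermo
-- ===== SOURCE B (Python) =====
-- def tabela_nivel1(entradas, mintermos, tabela_vdd):
--     # Direct index by count of '1's; set membership instead of scanning mintermos per level.
--     grupo0_binario = [[] for _ in range(entradas + 1)]
--     grupo0_mintermo = [[] for _ in range(entradas + 1)]
--     minset = set(mintermos)
--     for i, x in enumerate(tabela_vdd):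
--         c = x.count('1')
--         if c <= entradas and str(i) in minset:
--             grupo0_binario[c].append(x)
--             grupo0_mintermo[c].append("m" + str(i))
--     return grupo0_binario, grupo0_mintermo
-- ===== Notes on version B (the rewrite author's own statement) =====
-- stated objective: faster
-- what changed: Instead of scanning every 1s-count level per row (with a linear mintermos scan at each level), B builds set(mintermos) once and places each row directly at the index given by its own count of '1's.
import Mathlib
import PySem

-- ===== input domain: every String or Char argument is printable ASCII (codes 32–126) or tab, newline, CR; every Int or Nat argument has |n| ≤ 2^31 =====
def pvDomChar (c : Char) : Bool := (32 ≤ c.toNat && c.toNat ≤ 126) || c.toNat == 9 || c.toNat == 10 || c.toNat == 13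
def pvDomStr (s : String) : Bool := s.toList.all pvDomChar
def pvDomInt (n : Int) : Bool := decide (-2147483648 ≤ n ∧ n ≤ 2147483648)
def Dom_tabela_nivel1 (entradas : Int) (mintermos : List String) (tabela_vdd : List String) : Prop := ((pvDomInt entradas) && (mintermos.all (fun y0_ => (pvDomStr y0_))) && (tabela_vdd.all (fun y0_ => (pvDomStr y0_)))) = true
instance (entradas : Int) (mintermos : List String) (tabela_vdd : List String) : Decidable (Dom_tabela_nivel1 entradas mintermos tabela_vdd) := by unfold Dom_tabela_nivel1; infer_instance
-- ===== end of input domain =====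

-- B replaces A's per-row scan over every 1s-count level (and the list scan of mintermos at each
-- level) by a direct index with the row's own count of '1's and a set built once; return value only.

-- ===== PORT A =====
-- literal transliteration of A: the while loop 'contador_de_1s = 0; while contador_de_1s <= entradas'
-- is the iteration over range(0, entradas+1); Counter(x)['1'] is PySem.Dict.counter with default 0;
-- 'grupo[i].append(v)' (index always in range here) is pyGetD/pySetD at i.
def tabela_nivel1 (entradas : Int) (mintermos : List String) (tabela_vdd : List String) : List (List String) × List (List String) :=
  let init : List (List String) × List (List String) :=
    (PySem.List.pyRange 0 (entradas + 1) 1).foldl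
      (fun p _ => (p.1 ++ [[]], p.2 ++ [[]])) ([], [])
  let final :=
    tabela_vdd.foldl
      (fun (st : (List (List String) × List (List String)) × Int) x =>
        let termos := PySem.Dict.counter x.toList
        let g :=
          (PySem.List.pyRange 0 (entradas + 1) 1).foldl
            (fun g c =>
              if termos.getD '1' 0 = c ∧ mintermos.contains (PySem.Int.toStr st.2) then
                (PySem.List.pySetD g.1 c (PySem.List.pyGetD g.1 c [] ++ [x]),
                 PySem.List.pySetD g.2 c (PySem.List.pyGetD g.2 c [] ++ ["m" ++ PySem.Int.toStr st.2]))
              else g)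
            st.1
        (g, st.2 + 1))
      (init, 0)
  final.1

-- ===== PORT B =====
def tabela_nivel1_alt (entradas : Int) (mintermos : List String) (tabela_vdd : List String) : List (List String) × List (List String) :=
  let n := (entradas + 1).toNat
  let minset := PySem.Set.ofList mintermos
  (PySem.List.enumerate tabela_vdd 0).foldl
    (fun (g : List (List String) × List (List String)) p =>
      let c : Int := (PySem.Str.count p.2 "1" : Int)
      if c ≤ entradas ∧ PySem.Set.contains minset (PySem.Int.toStr p.1) then
        (PySem.List.pySetD g.1 c (PySem.List.pyGetD g.1 c [] ++ [p.2]),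
         PySem.List.pySetD g.2 c (PySem.List.pyGetD g.2 c [] ++ ["m" ++ PySem.Int.toStr p.1]))
      else g)
    (List.replicate n [], List.replicate n [])

-- ===== PRECONDITION & SPEC =====
def Spec_tabela_nivel1 (entradas : Int) (mintermos : List String) (tabela_vdd : List String) (out : List (List String) × List (List String)) : Prop := out = tabela_nivel1_alt entradas mintermos tabela_vdd
instance (entradas : Int) (mintermos : List String) (tabela_vdd : List String) (out : List (List String) × List (List String)) : Decidable (Spec_tabela_nivel1 entradas mintermos tabela_vdd out) := by unfold Spec_tabela_nivel1; infer_instance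

-- ===== CLAIM (what is proved, stated in full; the proofs are below) =====
def Claim_equal_tabela_nivel1 : Prop := ∀ (entradas : Int) (mintermos : List String) (tabela_vdd : List String), Dom_tabela_nivel1 entradas mintermos tabela_vdd → Spec_tabela_nivel1 entradas mintermos tabela_vdd (tabela_nivel1 entradas mintermos tabela_vdd)

-- ===== LEMMAS AND PROOFS =====

-- building the empty groups: A's append loop yields replicate
theorem pv_init_eq {α : Type} (l : List α) (a b : List (List String)) :
    l.foldl (fun (p : List (List String) × List (List String)) _ => (p.1 ++ [[]], p.2 ++ [[]])) (a, b)
      = (a ++ List.replicate l.length [], b ++ List.replicate l.length []) := by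
  induction l generalizing a b with
  | nil => simp
  | cons x t ih =>
      simp [List.foldl_cons, ih, List.replicate_succ, List.append_assoc]

-- str.count with a single-character pattern is the character count
theorem pv_count_go_one (fuel : Nat) (s : List Char) (acc : Nat) (h : s.length ≤ fuel) :
    PySem.Chars.count.go ['1'] fuel s acc = acc + s.count '1' := by
  induction fuel generalizing s acc with
  | zero =>
      cases s with
      | nil => simp [PySem.Chars.count.go]
      | cons c t => simp at h
  | succ f ih =>
      cases s with
      | nil => simp [PySem.Chars.count.go]
      | cons c t =>
          simp only [PySem.Chars.count.go]
          by_cases hc : c = '1'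
          · simp [hc, List.isPrefixOf, ih t (acc + 1) (by simpa using h)]
            omega
          · have hpre : (['1'].isPrefixOf (c :: t)) = false := by
              simp [List.isPrefixOf]; exact fun h' => hc h'.symm
            simp [hpre, ih t acc (by simpa using h), hc]

theorem pv_str_count_one (s : String) : PySem.Str.count s "1" = s.toList.count '1' := by
  have h := pv_count_go_one s.toList.length s.toList 0 le_rfl
  rw [PySem.Str.count_eq]
  show PySem.Chars.count s.toList ['1'] = _
  simp only [PySem.Chars.count, List.isEmpty]
  simpa using h

-- set membership in B equals list membership in A
theorem pv_contains_ofList (mintermos : List String) (s : String) :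
    PySem.Set.contains (PySem.Set.ofList mintermos) s = mintermos.contains s := by
  simp only [PySem.Set.contains]
  rw [Bool.eq_iff_iff]
  simp [PySem.Set.mem_ofList]

-- A's inner while loop fires at most once: it is the single direct update of B (or nothing)
theorem pv_inner_skip (ones : Int) (P : Prop) [Decidable P]
    (f : List (List String) × List (List String) → Int → List (List String) × List (List String))
    (l : List Int) (g : List (List String) × List (List String))
    (h : ∀ c ∈ l, c ≠ ones) :
    l.foldl (fun g c => if ones = c ∧ P then f g c else g) g = g := by
  induction l generalizing g with
  | nil => rfl
  | cons c t ih =>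
      have hc : c ≠ ones := h c (by simp)
      simp only [List.foldl_cons]
      rw [if_neg (by rintro ⟨h1, -⟩; exact hc h1.symm)]
      exact ih g (fun c hc => h c (by simp [hc]))

theorem pv_inner_range (ones a b : Int) (P : Prop) [Decidable P]
    (f : List (List String) × List (List String) → Int → List (List String) × List (List String))
    (g : List (List String) × List (List String)) :
    (PySem.List.pyRange a b 1).foldl (fun g c => if ones = c ∧ P then f g c else g) g
      = if a ≤ ones ∧ ones < b ∧ P then f g ones else g := by
  by_cases hin : a ≤ ones ∧ ones < b
  · rw [PySem.List.pyRange_one_append a ones b hin.1 (by omega),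
        PySem.List.pyRange_one_cons (show ones < b by omega)]
    rw [List.foldl_append, List.foldl_cons]
    by_cases hP : P
    · rw [pv_inner_skip ones P f _ g (fun c hc => by
        have := (PySem.List.mem_pyRange_one).1 hc; omega)]
      rw [if_pos ⟨rfl, hP⟩,
          pv_inner_skip ones P f _ (f g ones) (fun c hc => by
            have := (PySem.List.mem_pyRange_one).1 hc; omega),
          if_pos ⟨hin.1, hin.2, hP⟩]
    · rw [pv_inner_skip ones P f _ g (fun c hc => by
        have := (PySem.List.mem_pyRange_one).1 hc; omega)]
      rw [if_neg (by rintro ⟨-, hP'⟩; exact hP hP'),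
          pv_inner_skip ones P f _ g (fun c hc => by
            have := (PySem.List.mem_pyRange_one).1 hc; omega),
          if_neg (by rintro ⟨-, -, hP'⟩; exact hP hP')]
  · rw [if_neg (by rintro ⟨h1, h2, -⟩; exact hin ⟨h1, h2⟩)]
    exact pv_inner_skip ones P f _ g (fun c hc => by
      have := (PySem.List.mem_pyRange_one).1 hc; omega)

-- the two per-row loop bodies agree, for any group state and any row counter
theorem pv_outer (entradas : Int) (mintermos : List String) (tv : List String)
    (g : List (List String) × List (List String)) (casa : Int) :
    (tv.foldl
      (fun (st : (List (List String) × List (List String)) × Int) x =>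
        let termos := PySem.Dict.counter x.toList
        let g' :=
          (PySem.List.pyRange 0 (entradas + 1) 1).foldl
            (fun g c =>
              if termos.getD '1' 0 = c ∧ mintermos.contains (PySem.Int.toStr st.2) then
                (PySem.List.pySetD g.1 c (PySem.List.pyGetD g.1 c [] ++ [x]),
                 PySem.List.pySetD g.2 c (PySem.List.pyGetD g.2 c [] ++ ["m" ++ PySem.Int.toStr st.2]))
              else g)
            st.1
        (g', st.2 + 1))
      (g, casa)).1
    = (PySem.List.enumerate tv casa).foldl
        (fun (g : List (List String) × List (List String)) p =>
          let c : Int := (PySem.Str.count p.2 "1" : Int)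
          if c ≤ entradas ∧ PySem.Set.contains (PySem.Set.ofList mintermos) (PySem.Int.toStr p.1) then
            (PySem.List.pySetD g.1 c (PySem.List.pyGetD g.1 c [] ++ [p.2]),
             PySem.List.pySetD g.2 c (PySem.List.pyGetD g.2 c [] ++ ["m" ++ PySem.Int.toStr p.1]))
          else g)
        g := by
  induction tv generalizing g casa with
  | nil => simp [PySem.List.enumerate]
  | cons x t ih =>
      rw [PySem.List.enumerate_cons, List.foldl_cons, List.foldl_cons]
      rw [← ih _ (casa + 1)]
      congr 2
      simp only [PySem.Dict.getD_counter]
      rw [pv_inner_range ((x.toList.count '1' : Int)) 0 (entradas + 1)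
        (mintermos.contains (PySem.Int.toStr casa) = true)
        (fun g c =>
          (PySem.List.pySetD g.1 c (PySem.List.pyGetD g.1 c [] ++ [x]),
           PySem.List.pySetD g.2 c (PySem.List.pyGetD g.2 c [] ++ ["m" ++ PySem.Int.toStr casa]))) g]
      rw [pv_str_count_one, pv_contains_ofList]
      have h0 : (0 : Int) ≤ (x.toList.count '1' : Int) := by positivity
      by_cases hb : (x.toList.count '1' : Int) ≤ entradas ∧ mintermos.contains (PySem.Int.toStr casa) = true
      · rw [if_pos ⟨h0, by omega, hb.2⟩, if_pos hb]
      · rw [if_neg (by rintro ⟨-, h1, h2⟩; exact hb ⟨by omega, h2⟩), if_neg hb]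

-- ===== VERDICT (by name: the statement is the Claim_ definition above) =====
theorem tabela_nivel1_spec : Claim_equal_tabela_nivel1 := by
  intro entradas mintermos tabela_vdd _
  show tabela_nivel1 entradas mintermos tabela_vdd = tabela_nivel1_alt entradas mintermos tabela_vdd
  unfold tabela_nivel1 tabela_nivel1_alt
  rw [pv_init_eq]
  simp only [List.nil_append, PySem.List.length_pyRange_one, Int.sub_zero]
  exact pv_outer entradas mintermos tabela_vdd _ 0
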